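-- pv_equiv track=rewrite | github.com/mic159/benbox-slicer | benbox_slicer/gcode.py | gen_lines
-- ===== SOURCE A (Python) =====
-- def gen_lines(input):
--     current = None
--     last_on = None
--     for v, pos in input:
--         if v >= 10 and current is None:
--             current = pos
--             last_on = pos
--         elif v < 10 and current is not None:
--             yield (current, last_on)
--             current = None
--             last_on = None
--         elif v >= 10:
--             last_on = pos
--     if current is not None:
--         yield (current, last_on)
-- ===== SOURCE B (Python) =====
-- def gen_lines(input):
--     # Run-grouping decomposition: peel one "on" run (v >= 10) at a time,
--     # yield its first and last positions; no current/last_on state machine.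
--     items = list(input)
--     while items:
--         (v, pos), items = items[0], items[1:]
--         if v >= 10:
--             run = [pos]
--             while items and items[0][0] >= 10:
--                 run.append(items[0][1])
--                 items = items[1:]
--             yield (run[0], run[-1])
-- ===== Notes on version B (the rewrite author's own statement) =====
-- stated objective: alternative
-- what changed: Replaces the current/last_on Option state machine with a run-grouping decomposition: each maximal run of v>=10 entries is peeled off in one inner scan and its first/last positions are yielded directly.
import Mathlib
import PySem

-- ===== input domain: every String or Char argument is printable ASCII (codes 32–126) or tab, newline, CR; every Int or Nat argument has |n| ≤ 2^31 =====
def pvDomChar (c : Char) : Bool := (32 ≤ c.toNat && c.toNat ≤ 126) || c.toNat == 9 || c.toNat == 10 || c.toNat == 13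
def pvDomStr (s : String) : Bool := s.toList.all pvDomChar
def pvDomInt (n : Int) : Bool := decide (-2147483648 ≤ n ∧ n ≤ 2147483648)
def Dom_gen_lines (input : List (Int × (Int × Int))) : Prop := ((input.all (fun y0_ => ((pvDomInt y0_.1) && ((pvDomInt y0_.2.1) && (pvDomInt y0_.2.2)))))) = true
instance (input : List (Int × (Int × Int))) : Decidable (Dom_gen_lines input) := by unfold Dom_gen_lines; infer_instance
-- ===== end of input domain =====

-- B replaces A's current/last_on state machine by peeling off one maximal run of
-- v >= 10 entries at a time (alternative decomposition; same O(n) return value).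

-- ===== PORT A =====
-- state machine loop: the state is (current, last_on); in A both are None or both set,
-- so it is one Option of a pair here.
def pvGenLinesLoop : List (Int × (Int × Int)) → Option ((Int × Int) × (Int × Int)) →
    List ((Int × Int) × (Int × Int))
  | [], none => []
  | [], some cl => [cl]
  | (v, pos) :: rest, none =>
      if v ≥ 10 then pvGenLinesLoop rest (some (pos, pos))
      else pvGenLinesLoop rest none
  | (v, pos) :: rest, some (c, l) =>
      if v < 10 then (c, l) :: pvGenLinesLoop rest none
      else pvGenLinesLoop rest (some (c, pos))

def gen_lines (input : List (Int × (Int × Int))) : List ((Int × Int) × (Int × Int)) :=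
  pvGenLinesLoop input none

-- ===== PORT B =====
-- the 'on' predicate v >= 10
def pvOn (q : Int × (Int × Int)) : Bool := decide (q.1 ≥ 10)

def gen_lines_alt : List (Int × (Int × Int)) → List ((Int × Int) × (Int × Int))
  | [] => []
  | (v, pos) :: items =>
      if v ≥ 10 then
        let run := pos :: (items.takeWhile pvOn).map Prod.snd
        (pos, run.getLastD pos) :: gen_lines_alt (items.dropWhile pvOn)
      else gen_lines_alt items
termination_by items => items.length
decreasing_by
  · exact Nat.lt_succ_of_le (List.length_dropWhile_le pvOn items)
  · simp

-- ===== PRECONDITION & SPEC =====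
def Spec_gen_lines (input : List (Int × (Int × Int))) (out : List ((Int × Int) × (Int × Int))) : Prop := out = gen_lines_alt input
instance (input : List (Int × (Int × Int))) (out : List ((Int × Int) × (Int × Int))) : Decidable (Spec_gen_lines input out) := by unfold Spec_gen_lines; infer_instance

-- ===== CLAIM (what is proved, stated in full; the proofs are below) =====
def Claim_equal_gen_lines : Prop := ∀ (input : List (Int × (Int × Int))), Dom_gen_lines input → Spec_gen_lines input (gen_lines input)

-- ===== LEMMAS AND PROOFS =====

theorem pvGenLines_key (input : List (Int × (Int × Int))) :
    pvGenLinesLoop input none = gen_lines_alt input ∧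
    ∀ c lp, pvGenLinesLoop input (some (c, lp)) =
      (c, ((input.takeWhile pvOn).map Prod.snd).getLastD lp) ::
        gen_lines_alt (input.dropWhile pvOn) := by
  induction input with
  | nil => refine ⟨?_, fun c lp => ?_⟩ <;> simp [pvGenLinesLoop, gen_lines_alt]
  | cons hd rest ih =>
    obtain ⟨v, pos⟩ := hd
    constructor
    · by_cases hv : v ≥ 10
      · simp only [pvGenLinesLoop, if_pos hv, ih.2 pos pos, gen_lines_alt,
          List.getLastD_cons]
      · simp only [pvGenLinesLoop, ih.1, gen_lines_alt, if_neg hv]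
    · intro c lp
      by_cases hv : v < 10
      · have hp : pvOn (v, pos) = false := by simp [pvOn]; omega
        simp only [pvGenLinesLoop, if_pos hv, ih.1, List.takeWhile_cons, hp,
          List.dropWhile_cons, Bool.false_eq_true, if_false, List.map_nil,
          List.getLastD_nil, gen_lines_alt, if_neg (by omega : ¬ v ≥ 10)]
      · have hp : pvOn (v, pos) = true := by simp [pvOn]; omega
        simp only [pvGenLinesLoop, if_neg hv, ih.2 c pos, List.takeWhile_cons, hp,
          List.dropWhile_cons, if_true, List.map_cons, List.getLastD_cons]

-- ===== VERDICT (by name: the statement is the Claim_ definition above) =====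
theorem gen_lines_spec : Claim_equal_gen_lines := by
  intro input _
  show gen_lines input = gen_lines_alt input
  exact (pvGenLines_key input).1
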